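-- pv_equiv track=rewrite | github.com/prachiraut711/RSL_Practice | que_47.py | max_duplicate_distance
-- ===== SOURCE A (Python) =====
-- def max_duplicate_distance(arr):
--     first_index = {}
--     max_dist = -1   #By initializing max_dist = -1, we can detect array has no duplicates, then there is no valid distance to return and we return -1 to mean "no duplicate found."
--     max_pair = (-1, -1)
--
--     for i, val in enumerate(arr): # enumerate map index with value example here {0:1, 1:2, 3:3...}
--         if val in first_index:
--             dist = i - first_index[val]
--             if dist > max_dist:
--                 max_dist = dist
--                 max_pair = (first_index[val], i)
--         else:
--             first_index[val] = i
--
--     return max_dist, max_pair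
-- ===== SOURCE B (Python) =====
-- def max_duplicate_distance(arr):
--     first = {}
--     last = {}
--     for i, val in enumerate(arr):
--         if val not in first:
--             first[val] = i
--         last[val] = i
--     max_dist = -1
--     max_pair = (-1, -1)
--     for i, val in enumerate(arr):
--         f = first[val]
--         if f < i and last[val] == i:
--             dist = i - f
--             if dist > max_dist:
--                 max_dist = dist
--                 max_pair = (f, i)
--     return max_dist, max_pair
-- ===== Notes on version B (the rewrite author's own statement) =====
-- stated objective: alternative
-- what changed: Replaces A's single pass with an incrementally built first-index dict and a running max updated at every duplicate occurrence by a two-pass scheme: pass one builds complete first- and last-index dicts, pass two considers each value only once, at its last occurrence, where its distance is maximal.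
import Mathlib
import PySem

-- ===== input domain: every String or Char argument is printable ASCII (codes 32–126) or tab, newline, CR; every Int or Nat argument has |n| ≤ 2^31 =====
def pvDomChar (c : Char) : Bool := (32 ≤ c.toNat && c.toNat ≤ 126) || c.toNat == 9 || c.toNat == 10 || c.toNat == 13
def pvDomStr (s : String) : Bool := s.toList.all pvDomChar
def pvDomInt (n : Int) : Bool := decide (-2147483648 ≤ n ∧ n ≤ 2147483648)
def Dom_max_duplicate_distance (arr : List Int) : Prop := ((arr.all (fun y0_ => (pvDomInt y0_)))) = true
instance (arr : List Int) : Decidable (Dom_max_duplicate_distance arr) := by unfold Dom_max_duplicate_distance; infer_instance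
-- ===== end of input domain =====

-- B replaces A's single pass (incremental first-index dict + running max at every duplicate
-- occurrence) by two passes: build complete first/last-index dicts, then update the max only
-- at each value's last occurrence; same cost, proved to return exactly A's value.


-- ===== PORT A =====
-- the body of A's loop: `if val in first_index: … else: first_index[val] = i`
def pvStepA (s : PySem.Dict Int Int × (Int × (Int × Int))) (iv : Int × Int) :
    PySem.Dict Int Int × (Int × (Int × Int)) :=
  match s.1.get? iv.2 with
  | some f => if iv.1 - f > s.2.1 then (s.1, (iv.1 - f, (f, iv.1))) else s
  | none => (s.1.insert iv.2 iv.1, s.2)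

def max_duplicate_distance (arr : List Int) : Int × (Int × Int) :=
  ((PySem.List.enumerate arr).foldl pvStepA (PySem.Dict.empty, (-1, (-1, -1)))).2

-- ===== PORT B =====
-- first pass of B: `if val not in first: first[val] = i` ; `last[val] = i`
def pvStepFL (s : PySem.Dict Int Int × PySem.Dict Int Int) (iv : Int × Int) :
    PySem.Dict Int Int × PySem.Dict Int Int :=
  ((if s.1.contains iv.2 then s.1 else s.1.insert iv.2 iv.1), s.2.insert iv.2 iv.1)

-- second pass of B: `f = first[val]; if f < i and last[val] == i: …`
def pvStepB (first last : PySem.Dict Int Int) (s : Int × (Int × Int)) (iv : Int × Int) :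
    Int × (Int × Int) :=
  match first.get? iv.2 with
  | some f =>
      if f < iv.1 ∧ last.get? iv.2 = some iv.1 then
        (if iv.1 - f > s.1 then (iv.1 - f, (f, iv.1)) else s)
      else s
  | none => s  -- unreachable: every value occurring in arr is a key of `first`

def max_duplicate_distance_alt (arr : List Int) : Int × (Int × Int) :=
  let fl := (PySem.List.enumerate arr).foldl pvStepFL (PySem.Dict.empty, PySem.Dict.empty)
  (PySem.List.enumerate arr).foldl (pvStepB fl.1 fl.2) (-1, (-1, -1))

-- ===== PRECONDITION & SPEC =====
def Spec_max_duplicate_distance (arr : List Int) (out : Int × (Int × Int)) : Prop := out = max_duplicate_distance_alt arr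
instance (arr : List Int) (out : Int × (Int × Int)) : Decidable (Spec_max_duplicate_distance arr out) := by unfold Spec_max_duplicate_distance; infer_instance

-- ===== CLAIM (what is proved, stated in full; the proofs are below) =====
def Claim_equal_max_duplicate_distance : Prop := ∀ (arr : List Int), Dom_max_duplicate_distance arr → Spec_max_duplicate_distance arr (max_duplicate_distance arr)

-- ===== LEMMAS AND PROOFS =====

-- index of the first occurrence of v in l
def fstIdx : List Int → Int → Option Nat
  | [], _ => none
  | a :: t, v => if a = v then some 0 else (fstIdx t v).map (· + 1)

-- index of the last occurrence of v in l
def lstIdx : List Int → Int → Option Nat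
  | [], _ => none
  | a :: t, v =>
      match lstIdx t v with
      | some k => some (k + 1)
      | none => if a = v then some 0 else none

-- the running-max update both loops share (at index i with first occurrence f)
def pvUpd (s : Int × (Int × Int)) (f i : Nat) : Int × (Int × Int) :=
  if (i : Int) - f > s.1 then ((i : Int) - f, ((f : Int), (i : Int))) else s

-- candidate of A at index i: first occurrence of arr[i] strictly inside the prefix
def candA (arr : List Int) (i : Nat) : Option Nat := fstIdx (arr.take i) (arr.getD i 0)

-- candidate of B at index i: only at the last occurrence of a duplicated value
def candB (arr : List Int) (i : Nat) : Option Nat :=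
  match fstIdx arr (arr.getD i 0) with
  | some f => if f < i ∧ lstIdx arr (arr.getD i 0) = some i then some f else none
  | none => none

-- gated fold over indices [0, n), recursion peeling the LAST index
def gfold (P : Nat → Option Nat) (s : Int × (Int × Int)) : Nat → Int × (Int × Int)
  | 0 => s
  | n + 1 =>
      match P n with
      | some f => pvUpd (gfold P s n) f n
      | none => gfold P s n

-- gated fold over the segment [k, k+m), recursion peeling the FIRST index
def gseg (P : Nat → Option Nat) (s : Int × (Int × Int)) : Nat → Nat → Int × (Int × Int)
  | _, 0 => s
  | k, m + 1 =>
      gseg P (match P k with | some f => pvUpd s f k | none => s) (k + 1) m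

-- the candidate distance at index i (-1 = no candidate)
def dOf (P : Nat → Option Nat) (i : Nat) : Int :=
  match P i with
  | some f => (i : Int) - f
  | none => -1

-- maximum candidate distance over [0, n)
def MxP (P : Nat → Option Nat) : Nat → Int
  | 0 => -1
  | n + 1 => max (MxP P n) (dOf P n)

-- the (f, i) pair at index i if its distance is exactly M
def entryP (P : Nat → Option Nat) (i : Nat) (M : Int) : Option (Int × Int) :=
  match P i with
  | some f => if (i : Int) - f = M then some ((f : Int), (i : Int)) else none
  | none => none

-- first index in [0, n) whose candidate distance is exactly M, with its pair
def FsP (P : Nat → Option Nat) : Nat → Int → Option (Int × Int)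
  | 0, _ => none
  | n + 1, M => (FsP P n M).orElse (fun _ => entryP P n M)

-- ---------- basic fstIdx / lstIdx facts ----------

theorem fstIdx_append (l r : List Int) (v : Int) :
    fstIdx (l ++ r) v = (fstIdx l v).orElse (fun _ => (fstIdx r v).map (· + l.length)) := by
  induction l with
  | nil => cases h : fstIdx r v <;> simp [fstIdx, h]
  | cons a t ih =>
    by_cases hav : a = v
    · simp [fstIdx, hav]
    · cases hf : fstIdx t v <;> cases hr : fstIdx r v <;>
        simp_all [fstIdx, hav, ih, Option.orElse] <;> omega

theorem lstIdx_append (l r : List Int) (v : Int) :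
    lstIdx (l ++ r) v =
      match lstIdx r v with
      | some k => some (l.length + k)
      | none => lstIdx l v := by
  induction l with
  | nil => cases h : lstIdx r v <;> simp [lstIdx, h]
  | cons a t ih =>
    cases h : lstIdx r v <;> cases h2 : lstIdx t v <;>
      simp_all [lstIdx] <;> omega

theorem fstIdx_lt_length {l : List Int} {v : Int} {f : Nat} (h : fstIdx l v = some f) :
    f < l.length := by
  induction l generalizing f with
  | nil => simp [fstIdx] at h
  | cons a t ih =>
    by_cases hav : a = v
    · simp only [fstIdx, hav, if_true] at h
      cases h; simp
    · simp only [fstIdx, hav, if_false, Option.map_eq_some_iff] at h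
      obtain ⟨f', hf', rfl⟩ := h
      have := ih hf'
      simp; omega

theorem fstIdx_eq_none_iff {l : List Int} {v : Int} : fstIdx l v = none ↔ v ∉ l := by
  induction l with
  | nil => simp [fstIdx]
  | cons a t ih =>
    by_cases hav : a = v <;> simp_all [fstIdx, eq_comm]

theorem lstIdx_getD {l : List Int} {v : Int} {k : Nat} (h : lstIdx l v = some k) :
    k < l.length ∧ l.getD k 0 = v := by
  induction l generalizing k with
  | nil => simp [lstIdx] at h
  | cons a t ih =>
    simp only [lstIdx] at h
    cases h2 : lstIdx t v with
    | some m =>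
      rw [h2] at h
      obtain ⟨hlt, hget⟩ := ih h2
      cases h; simpa using ⟨by omega, hget⟩
    | none =>
      rw [h2] at h
      by_cases hav : a = v
      · simp only [hav, if_true] at h
        cases h; simp [hav]
      · simp [hav] at h

theorem le_lstIdx_getD {l : List Int} {i : Nat} (h : i < l.length) :
    ∃ k, lstIdx l (l.getD i 0) = some k ∧ i ≤ k := by
  induction l generalizing i with
  | nil => simp at h
  | cons a t ih =>
    cases i with
    | zero =>
      simp only [List.getD_cons_zero]
      cases h2 : lstIdx t a with
      | some m => exact ⟨m + 1, by simp [lstIdx, h2], by omega⟩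
      | none => exact ⟨0, by simp [lstIdx, h2], le_refl 0⟩
    | succ j =>
      have hj : j < t.length := by simpa using h
      obtain ⟨k, hk, hle⟩ := ih hj
      refine ⟨k + 1, ?_, by omega⟩
      simp only [List.getD_cons_succ, lstIdx, hk]

theorem fstIdx_take {arr : List Int} {v : Int} {f i : Nat}
    (h : fstIdx arr v = some f) (hfi : f < i) : fstIdx (arr.take i) v = some f := by
  have hl := fstIdx_lt_length h
  have h' := h
  rw [← List.take_append_drop i arr, fstIdx_append] at h'
  cases h2 : fstIdx (arr.take i) v with
  | some f' => simp [h2] at h'; exact congrArg some h'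
  | none =>
    exfalso
    simp [h2] at h'
    obtain ⟨g, hg, hfg⟩ := h'
    omega

theorem fstIdx_of_take {arr : List Int} {v : Int} {f i : Nat}
    (h : fstIdx (arr.take i) v = some f) : fstIdx arr v = some f ∧ f < i := by
  have hlt := fstIdx_lt_length h
  have hlen : (arr.take i).length = min i arr.length := by simp
  constructor
  · rw [← List.take_append_drop i arr, fstIdx_append, h]; rfl
  · omega

-- ---------- phase 1: the ports compute gated folds ----------

theorem getD_append_cons (pre : List Int) (v : Int) (t : List Int) :
    (pre ++ v :: t).getD pre.length 0 = v := by
  induction pre with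
  | nil => rfl
  | cons a p ih => simpa using ih

theorem take_append_cons (pre : List Int) (v : Int) (t : List Int) :
    (pre ++ v :: t).take pre.length = pre := by
  induction pre with
  | nil => rfl
  | cons a p ih => simpa using ih

theorem A_loop (rest pre : List Int) (d : PySem.Dict Int Int) (s : Int × (Int × Int))
    (hd : ∀ v, d.get? v = (fstIdx pre v).map (fun n => (n : Int))) :
    ((PySem.List.enumerate rest (pre.length : Int)).foldl pvStepA (d, s)).2 =
      gseg (candA (pre ++ rest)) s pre.length rest.length := by
  induction rest generalizing pre d s with
  | nil => simp [PySem.List.enumerate_nil, gseg]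
  | cons v t ih =>
    rw [PySem.List.enumerate_cons, List.foldl_cons]
    simp only [List.length_cons]
    have hc0 : (pre ++ v :: t).getD pre.length 0 = v := getD_append_cons pre v t
    have hct : (pre ++ v :: t).take pre.length = pre := take_append_cons pre v t
    cases hf : fstIdx pre v with
    | some f =>
      have hget : d.get? v = some (f : Int) := by rw [hd]; simp [hf]
      have hA : pvStepA (d, s) ((pre.length : Int), v) = (d, pvUpd s f pre.length) := by
        by_cases hgt : ((pre.length : Int) - (f : Int)) > s.1 <;> simp [pvStepA, pvUpd, hget, hgt]
      have hd' : ∀ w, d.get? w = (fstIdx (pre ++ [v]) w).map (fun n => (n : Int)) := by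
        intro w
        rw [hd, fstIdx_append]
        by_cases hwv : v = w
        · subst hwv; simp [hf]
        · cases hw : fstIdx pre w <;> simp [hw, fstIdx, hwv]
      have hcand : candA (pre ++ v :: t) pre.length = some f := by
        unfold candA; rw [hc0, hct]; exact hf
      rw [hA]
      have := ih (pre ++ [v]) d (pvUpd s f pre.length) hd'
      simp only [List.length_append, List.length_cons, List.length_nil, List.append_assoc,
        List.singleton_append, Nat.cast_add, Nat.cast_one] at this
      rw [show gseg (candA (pre ++ v :: t)) s pre.length (t.length + 1) =
            gseg (candA (pre ++ v :: t)) (pvUpd s f pre.length) (pre.length + 1) t.length by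
          simp only [gseg, hcand]]
      exact this
    | none =>
      have hget : d.get? v = none := by rw [hd]; simp [hf]
      have hA : pvStepA (d, s) ((pre.length : Int), v) = (d.insert v (pre.length : Int), s) := by
        simp only [pvStepA, hget]
      have hd' : ∀ w, (d.insert v (pre.length : Int)).get? w =
          (fstIdx (pre ++ [v]) w).map (fun n => (n : Int)) := by
        intro w
        rw [PySem.Dict.get?_insert, fstIdx_append]
        by_cases hwv : w = v
        · subst hwv; simp [hf, fstIdx]
        · rw [if_neg hwv, hd]
          cases hw : fstIdx pre w <;> simp [hw, fstIdx, Ne.symm hwv]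
      have hcand : candA (pre ++ v :: t) pre.length = none := by
        unfold candA; rw [hc0, hct]; exact hf
      rw [hA]
      have := ih (pre ++ [v]) (d.insert v (pre.length : Int)) s hd'
      simp only [List.length_append, List.length_cons, List.length_nil, List.append_assoc,
        List.singleton_append, Nat.cast_add, Nat.cast_one] at this
      rw [show gseg (candA (pre ++ v :: t)) s pre.length (t.length + 1) =
            gseg (candA (pre ++ v :: t)) s (pre.length + 1) t.length by
          simp only [gseg, hcand]]
      exact this

theorem FL_loop (rest pre : List Int) (dF dL : PySem.Dict Int Int)
    (hF : ∀ v, dF.get? v = (fstIdx pre v).map (fun n => (n : Int)))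
    (hL : ∀ v, dL.get? v = (lstIdx pre v).map (fun n => (n : Int))) :
    (∀ v, ((PySem.List.enumerate rest (pre.length : Int)).foldl pvStepFL (dF, dL)).1.get? v =
        (fstIdx (pre ++ rest) v).map (fun n => (n : Int))) ∧
    (∀ v, ((PySem.List.enumerate rest (pre.length : Int)).foldl pvStepFL (dF, dL)).2.get? v =
        (lstIdx (pre ++ rest) v).map (fun n => (n : Int))) := by
  induction rest generalizing pre dF dL with
  | nil =>
    constructor <;> intro w <;> simp only [PySem.List.enumerate_nil, List.foldl_nil, List.append_nil]
    · exact hF w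
    · exact hL w
  | cons v t ih =>
    rw [PySem.List.enumerate_cons, List.foldl_cons]
    have hstep : pvStepFL (dF, dL) ((pre.length : Int), v) =
        ((if dF.contains v then dF else dF.insert v (pre.length : Int)),
         dL.insert v (pre.length : Int)) := rfl
    rw [hstep]
    have hF' : ∀ w, (if dF.contains v then dF else dF.insert v (pre.length : Int)).get? w =
        (fstIdx (pre ++ [v]) w).map (fun n => (n : Int)) := by
      intro w
      rw [fstIdx_append]
      by_cases hcv : dF.contains v
      · rw [if_pos hcv, hF]
        have hsome : (fstIdx pre v).isSome := by
          have := hF v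
          rw [PySem.Dict.contains_eq_isSome_get?] at hcv
          rw [this] at hcv
          cases hfv : fstIdx pre v <;> simp [hfv] at hcv ⊢
        by_cases hwv : v = w
        · subst hwv
          cases hfv : fstIdx pre v <;> simp [hfv] at hsome ⊢
        · cases hw : fstIdx pre w <;> simp [hw, fstIdx, hwv]
      · rw [if_neg hcv, PySem.Dict.get?_insert]
        have hnone : fstIdx pre v = none := by
          rw [PySem.Dict.contains_eq_isSome_get?] at hcv
          rw [hF v] at hcv
          cases hfv : fstIdx pre v <;> simp [hfv] at hcv ⊢
        by_cases hwv : w = v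
        · subst hwv; simp [hnone, fstIdx]
        · rw [if_neg hwv, hF]
          cases hw : fstIdx pre w <;> simp [hw, fstIdx, Ne.symm hwv]
    have hL' : ∀ w, (dL.insert v (pre.length : Int)).get? w =
        (lstIdx (pre ++ [v]) w).map (fun n => (n : Int)) := by
      intro w
      rw [PySem.Dict.get?_insert, lstIdx_append]
      by_cases hwv : w = v
      · subst hwv; simp [lstIdx]
      · rw [if_neg hwv, hL]
        simp only [lstIdx, Ne.symm hwv, if_false]
    have := ih (pre ++ [v]) _ _ hF' hL'
    simpa [List.append_assoc] using this

theorem B_loop (arr : List Int) (rest pre : List Int) (hsplit : pre ++ rest = arr)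
    (dF dL : PySem.Dict Int Int)
    (hF : ∀ v, dF.get? v = (fstIdx arr v).map (fun n => (n : Int)))
    (hL : ∀ v, dL.get? v = (lstIdx arr v).map (fun n => (n : Int)))
    (s : Int × (Int × Int)) :
    (PySem.List.enumerate rest (pre.length : Int)).foldl (pvStepB dF dL) s =
      gseg (candB arr) s pre.length rest.length := by
  induction rest generalizing pre s with
  | nil => simp [PySem.List.enumerate_nil, gseg]
  | cons v t ih =>
    rw [PySem.List.enumerate_cons, List.foldl_cons]
    simp only [List.length_cons]
    have hvmem : v ∈ arr := by rw [← hsplit]; simp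
    have hgd : arr.getD pre.length 0 = v := by rw [← hsplit]; exact getD_append_cons pre v t
    cases hf : fstIdx arr v with
    | none => exact absurd (fstIdx_eq_none_iff.mp hf) (by simpa using hvmem)
    | some f =>
      have hget : dF.get? v = some (f : Int) := by rw [hF]; simp [hf]
      have hstep : pvStepB dF dL s ((pre.length : Int), v) =
          (match candB arr pre.length with
           | some f' => pvUpd s f' pre.length
           | none => s) := by
        unfold candB
        rw [hgd, hf]
        simp only [pvStepB, hget]
        by_cases hcond : f < pre.length ∧ lstIdx arr v = some pre.length
        · rw [if_pos hcond]
          have hLv : dL.get? v = some ((pre.length : Nat) : Int) := by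
            rw [hL, hcond.2]; rfl
          rw [if_pos ⟨by exact_mod_cast hcond.1, hLv⟩]
          rfl
        · rw [if_neg hcond]
          have : ¬ ((f : Int) < (pre.length : Int) ∧ dL.get? v = some ((pre.length : Nat) : Int)) := by
            intro ⟨h1, h2⟩
            apply hcond
            refine ⟨by exact_mod_cast h1, ?_⟩
            rw [hL] at h2
            cases hlv : lstIdx arr v with
            | none => rw [hlv] at h2; simp at h2
            | some k =>
              rw [hlv] at h2
              simp at h2
              exact congrArg some (by exact_mod_cast h2)
          rw [if_neg this]
      rw [hstep]
      have hnext := ih (pre ++ [v]) (by simpa [List.append_assoc] using hsplit)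
      cases hc : candB arr pre.length with
      | some f' =>
        rw [show gseg (candB arr) s pre.length (t.length + 1) =
              gseg (candB arr) (pvUpd s f' pre.length) (pre.length + 1) t.length by
            simp only [gseg, hc]]
        simpa using hnext (pvUpd s f' pre.length)
      | none =>
        rw [show gseg (candB arr) s pre.length (t.length + 1) =
              gseg (candB arr) s (pre.length + 1) t.length by
            simp only [gseg, hc]]
        simpa using hnext s

theorem gseg_snoc (P : Nat → Option Nat) (s : Int × (Int × Int)) (k m : Nat) :
    gseg P s k (m + 1) =
      (match P (k + m) with
       | some f => pvUpd (gseg P s k m) f (k + m)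
       | none => gseg P s k m) := by
  induction m generalizing s k with
  | zero => cases hp : P k <;> simp [gseg, hp]
  | succ m ih =>
    show gseg P _ (k + 1) (m + 1) = _
    rw [ih]
    have : k + 1 + m = k + (m + 1) := by omega
    rw [this]
    cases hp : P (k + (m + 1)) <;> simp [gseg]

theorem gfold_eq_gseg (P : Nat → Option Nat) (s : Int × (Int × Int)) (n : Nat) :
    gseg P s 0 n = gfold P s n := by
  induction n with
  | zero => rfl
  | succ n ih =>
    rw [gseg_snoc]
    simp only [Nat.zero_add, gfold, ih]

-- ---------- phase 2: characterisation of the gated fold ----------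

theorem neg_one_le_MxP (P : Nat → Option Nat) (n : Nat) : -1 ≤ MxP P n := by
  induction n with
  | zero => exact le_refl _
  | succ n ih => exact le_trans ih (le_max_left _ _)

theorem dOf_le_MxP (P : Nat → Option Nat) {i n : Nat} (h : i < n) : dOf P i ≤ MxP P n := by
  induction n with
  | zero => omega
  | succ n ih =>
    rcases Nat.lt_succ_iff_lt_or_eq.mp h with h' | h'
    · exact le_trans (ih h') (le_max_left _ _)
    · subst h'; exact le_max_right _ _

theorem MxP_le (P : Nat → Option Nat) {n : Nat} {c : Int} (hc : -1 ≤ c)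
    (h : ∀ i, i < n → dOf P i ≤ c) : MxP P n ≤ c := by
  induction n with
  | zero => exact hc
  | succ n ih =>
    exact max_le (ih (fun i hi => h i (by omega))) (h n (by omega))

theorem FsP_eq_none_of_gt (P : Nat → Option Nat) {n : Nat} {M : Int}
    (h : MxP P n < M) : FsP P n M = none := by
  induction n with
  | zero => rfl
  | succ n ih =>
    simp only [MxP, max_lt_iff] at h
    simp only [FsP, ih h.1, Option.orElse_eq_or, Option.none_or]
    have h2 := h.2
    cases hp : P n with
    | none => simp [entryP, hp]
    | some f =>
      simp only [dOf, hp] at h2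
      simp only [entryP, hp]
      rw [if_neg (by omega : ¬ ((n : Int) - f = M))]

theorem FsP_isSome (P : Nat → Option Nat) {n : Nat} (h : -1 < MxP P n) :
    (FsP P n (MxP P n)).isSome := by
  induction n with
  | zero => simp [MxP] at h
  | succ n ih =>
    by_cases hlt : MxP P n < MxP P (n + 1)
    · have hM : MxP P (n + 1) = dOf P n := by
        simp only [MxP] at hlt ⊢
        omega
      rw [FsP, FsP_eq_none_of_gt P (hM ▸ hlt)]
      simp only [Option.orElse_eq_or, Option.none_or, entryP]
      cases hp : P n with
      | none =>
        simp only [dOf, hp] at hM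
        rw [hM] at h; omega
      | some f =>
        simp only [dOf, hp] at hM
        simp [← hM]
    · have hM : MxP P (n + 1) = MxP P n := by
        have h1 : MxP P n ≤ MxP P (n + 1) := le_max_left _ _
        omega
      rw [FsP, hM]
      have := ih (by omega)
      cases hfs : FsP P n (MxP P n) with
      | none => rw [hfs] at this; simp at this
      | some p => simp

theorem gfold_char (P : Nat → Option Nat) (hP : ∀ i f, P i = some f → f < i)
    (n : Nat) (md : Int) (mp : Int × Int) (hmd : -1 ≤ md) :
    gfold P (md, mp) n =
      (max md (MxP P n),
       if md < MxP P n then (FsP P n (MxP P n)).elim mp id else mp) := by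
  induction n with
  | zero =>
    simp only [gfold, MxP, FsP]
    rw [max_eq_left hmd, if_neg (by omega)]
  | succ n ih =>
    have hMn := neg_one_le_MxP P n
    simp only [gfold, MxP]
    cases hp : P n with
    | none =>
      have hd : dOf P n = -1 := by simp [dOf, hp]
      rw [ih, hd, max_eq_left hMn]
      have he : entryP P n (MxP P n) = none := by simp [entryP, hp]
      by_cases hlt : md < MxP P n
      · rw [if_pos hlt, if_pos hlt, FsP, he]
        cases hfs : FsP P n (MxP P n) <;> simp
      · rw [if_neg hlt, if_neg hlt]
    | some f =>
      have hd : dOf P n = (n : Int) - f := by simp [dOf, hp]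
      show pvUpd (gfold P (md, mp) n) f n = _
      rw [ih]
      simp only [pvUpd]
      by_cases hgt : (n : Int) - f > max md (MxP P n)
      · rw [if_pos hgt]
        have hent : entryP P n ((n : Int) - f) = some ((f : Int), (n : Int)) := by
          simp [entryP, hp]
        have hM1 : max (MxP P n) (dOf P n) = (n : Int) - f := by omega
        rw [hM1]
        rw [max_eq_right (by omega : md ≤ (n : Int) - (f : Int))]
        rw [if_pos (by omega : md < (n : Int) - (f : Int))]
        rw [FsP, FsP_eq_none_of_gt P (by omega : MxP P n < (n : Int) - (f : Int)), hent]
        simp only [Option.orElse_eq_or, Option.none_or, Option.elim_some, id]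
      · rw [if_neg hgt]
        have hM1 : max md (max (MxP P n) (dOf P n)) = max md (MxP P n) := by omega
        rw [hM1]
        congr 1
        by_cases hcase : md < max (MxP P n) (dOf P n)
        · rw [if_pos hcase]
          have hlt : md < MxP P n := by omega
          rw [if_pos hlt]
          have hM2 : max (MxP P n) (dOf P n) = MxP P n := by omega
          rw [hM2, FsP]
          have := FsP_isSome P (by omega : -1 < MxP P n)
          cases hfs : FsP P n (MxP P n) with
          | none => rw [hfs] at this; simp at this
          | some p => simp
        · rw [if_neg hcase]
          have hge : ¬ md < MxP P n := by
            intro hlt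
            exact hcase (lt_of_lt_of_le hlt (le_max_left _ _))
          rw [if_neg hge]

theorem candB_sub (arr : List Int) {i f : Nat} (h : candB arr i = some f) :
    candA arr i = some f := by
  unfold candB at h
  cases hf : fstIdx arr (arr.getD i 0) with
  | none => rw [hf] at h; cases h
  | some f0 =>
    rw [hf] at h
    simp only [] at h
    by_cases hc : f0 < i ∧ lstIdx arr (arr.getD i 0) = some i
    · rw [if_pos hc] at h
      cases h
      unfold candA
      exact fstIdx_take hf hc.1
    · rw [if_neg hc] at h; cases h

theorem candA_dom (arr : List Int) {i f : Nat} (hi : i < arr.length)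
    (h : candA arr i = some f) :
    ∃ l, i ≤ l ∧ l < arr.length ∧ candB arr l = some f := by
  unfold candA at h
  obtain ⟨hfa, hfi⟩ := fstIdx_of_take h
  obtain ⟨l, hl, hil⟩ := le_lstIdx_getD hi
  obtain ⟨hlb, hgd⟩ := lstIdx_getD hl
  refine ⟨l, hil, hlb, ?_⟩
  unfold candB
  rw [hgd, hfa, hl]
  simp only []
  rw [if_pos ⟨by omega, trivial⟩]

theorem Mx_eq (arr : List Int) :
    MxP (candA arr) arr.length = MxP (candB arr) arr.length := by
  apply le_antisymm
  · apply MxP_le _ (neg_one_le_MxP _ _)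
    intro i hi
    cases hA : candA arr i with
    | none => rw [show dOf (candA arr) i = -1 by simp [dOf, hA]]; exact neg_one_le_MxP _ _
    | some f =>
      obtain ⟨l, hil, hln, hB⟩ := candA_dom arr hi hA
      have hle := dOf_le_MxP (candB arr) hln
      simp only [dOf, hB] at hle
      simp only [dOf, hA]
      omega
  · apply MxP_le _ (neg_one_le_MxP _ _)
    intro i hi
    cases hB : candB arr i with
    | none => rw [show dOf (candB arr) i = -1 by simp [dOf, hB]]; exact neg_one_le_MxP _ _
    | some f =>
      have hA := candB_sub arr hB
      have hle := dOf_le_MxP (candA arr) hi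
      simp only [dOf, hA] at hle
      simp only [dOf, hB]
      exact hle

theorem Fs_eq (arr : List Int) :
    FsP (candA arr) arr.length (MxP (candA arr) arr.length) =
      FsP (candB arr) arr.length (MxP (candA arr) arr.length) := by
  have hcongr : ∀ (P Q : Nat → Option Nat) (n : Nat) (M : Int),
      (∀ j, j < n → entryP P j M = entryP Q j M) → FsP P n M = FsP Q n M := by
    intro P Q n M h
    induction n with
    | zero => rfl
    | succ n ih =>
      simp only [FsP, ih (fun j hj => h j (by omega)), h n (by omega)]
  apply hcongr
  intro j hj
  cases hA : candA arr j with
  | none =>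
    cases hB : candB arr j with
    | none => simp [entryP, hA, hB]
    | some f => rw [candB_sub arr hB] at hA; cases hA
  | some f =>
    cases hB : candB arr j with
    | some f' =>
      have := candB_sub arr hB
      rw [hA] at this
      cases this
      simp [entryP, hA, hB]
    | none =>
      simp only [entryP, hA, hB]
      by_cases hEq : (j : Int) - f = MxP (candA arr) arr.length
      · exfalso
        obtain ⟨l, hjl, hln, hBl⟩ := candA_dom arr hj hA
        have hne : l ≠ j := by
          intro e
          rw [e, hB] at hBl
          cases hBl
        have hjl' : j < l := lt_of_le_of_ne hjl (fun e => hne e.symm)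
        have h1 := dOf_le_MxP (candB arr) hln
        simp only [dOf, hBl] at h1
        rw [← Mx_eq arr] at h1
        omega
      · rw [if_neg hEq]

theorem candA_lt (arr : List Int) : ∀ i f, candA arr i = some f → f < i := by
  intro i f h
  unfold candA at h
  have := fstIdx_lt_length h
  simp at this
  omega

theorem candB_lt (arr : List Int) : ∀ i f, candB arr i = some f → f < i := by
  intro i f h
  unfold candB at h
  cases hf : fstIdx arr (arr.getD i 0) with
  | none => rw [hf] at h; cases h
  | some f0 =>
    rw [hf] at h
    simp only [] at h
    by_cases hc : f0 < i ∧ lstIdx arr (arr.getD i 0) = some i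
    · rw [if_pos hc] at h; cases h; exact hc.1
    · rw [if_neg hc] at h; cases h

-- ===== VERDICT (by name: the statement is the Claim_ definition above) =====
theorem max_duplicate_distance_spec : Claim_equal_max_duplicate_distance := by
  intro arr _
  unfold Spec_max_duplicate_distance
  have hA : max_duplicate_distance arr = gfold (candA arr) (-1, (-1, -1)) arr.length := by
    unfold max_duplicate_distance
    have := A_loop arr [] PySem.Dict.empty (-1, (-1, -1))
      (by intro v; simp [fstIdx, PySem.Dict.get?_empty])
    simpa [gfold_eq_gseg] using this
  have hB : max_duplicate_distance_alt arr = gfold (candB arr) (-1, (-1, -1)) arr.length := by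
    unfold max_duplicate_distance_alt
    have hFL := FL_loop arr [] PySem.Dict.empty PySem.Dict.empty
      (by intro v; simp [fstIdx, PySem.Dict.get?_empty])
      (by intro v; simp [lstIdx, PySem.Dict.get?_empty])
    simp only [List.nil_append] at hFL
    have := B_loop arr arr [] rfl _ _ hFL.1 hFL.2 (-1, (-1, -1))
    simpa [gfold_eq_gseg] using this
  rw [hA, hB]
  rw [gfold_char _ (candA_lt arr) _ _ _ (by norm_num),
      gfold_char _ (candB_lt arr) _ _ _ (by norm_num)]
  rw [Fs_eq arr, Mx_eq arr]
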